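-- pv_equiv track=rewrite | github.com/Lizaterdag/kr-argumentation | archive/next_try3.py | get_preferred_extensions
-- ===== SOURCE A (Python) =====
-- def get_preferred_extensions(dictionaries):
--     max_in_value = 0
--     max_out_value = 0
--     result_in = []
--     result_out = []
--
--     for d in dictionaries:
--         count_in = sum(1 for value in d.values() if value == 'IN')
--         count_out = sum(1 for value in d.values() if value == 'OUT')
--
--         if count_in > max_in_value:
--             max_in_value = count_in
--             result_in = [d]
--         elif count_in == max_in_value:
--             result_in.append(d)
--
--         if count_out > max_out_value:
--             max_out_value = count_out
--             result_out = [d]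
--         elif count_out == max_out_value:
--             result_out.append(d)
--
--     return result_in + result_out
-- ===== SOURCE B (Python) =====
-- def get_preferred_extensions(dictionaries):
--     counts_in = [list(d.values()).count('IN') for d in dictionaries]
--     counts_out = [list(d.values()).count('OUT') for d in dictionaries]
--     max_in = max(counts_in, default=0)
--     max_out = max(counts_out, default=0)
--     result_in = [d for d, c in zip(dictionaries, counts_in) if c == max_in]
--     result_out = [d for d, c in zip(dictionaries, counts_out) if c == max_out]
--     return result_in + result_out
-- ===== Notes on version B (the rewrite author's own statement) =====
-- stated objective: simpler
-- what changed: Replaces A's online running-max-with-reset loop over coupled (max, result) state for both channels by a compute-all-counts-then-filter decomposition: take the max of each count list (default 0) and keep the dicts whose count equals it.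
import Mathlib
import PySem

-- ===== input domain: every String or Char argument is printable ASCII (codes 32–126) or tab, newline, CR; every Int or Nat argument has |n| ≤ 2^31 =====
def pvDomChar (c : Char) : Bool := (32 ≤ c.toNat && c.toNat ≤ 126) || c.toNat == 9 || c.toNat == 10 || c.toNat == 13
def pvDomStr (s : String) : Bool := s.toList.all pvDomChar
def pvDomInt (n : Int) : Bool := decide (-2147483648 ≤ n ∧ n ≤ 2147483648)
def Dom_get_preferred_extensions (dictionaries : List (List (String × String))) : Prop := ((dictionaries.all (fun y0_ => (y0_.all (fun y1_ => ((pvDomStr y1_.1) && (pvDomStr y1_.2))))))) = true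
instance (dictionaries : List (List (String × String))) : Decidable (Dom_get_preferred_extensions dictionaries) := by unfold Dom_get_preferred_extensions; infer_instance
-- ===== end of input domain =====

-- B replaces A's online running-max-with-reset loop by a compute-counts-then-filter decomposition (objective: simpler).
-- ===== PORT A =====
-- sum(1 for value in d.values() if value == 'IN') / 'OUT'
def pvCountA (d : List (String × String)) (v : String) : Int :=
  (PySem.Dict.ofList d).values.foldl (fun acc value => if value == v then acc + 1 else acc) 0

def get_preferred_extensions (dictionaries : List (List (String × String))) : List (List (String × String)) :=
  let st := dictionaries.foldl
    (fun (s : (Int × List (List (String × String))) × (Int × List (List (String × String)))) d =>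
      (let count_in := pvCountA d "IN"
       if count_in > s.1.1 then (count_in, [d])
       else if count_in == s.1.1 then (s.1.1, s.1.2 ++ [d]) else s.1,
       let count_out := pvCountA d "OUT"
       if count_out > s.2.1 then (count_out, [d])
       else if count_out == s.2.1 then (s.2.1, s.2.2 ++ [d]) else s.2))
    ((0, []), (0, []))
  st.1.2 ++ st.2.2

-- ===== PORT B =====
-- list(d.values()).count('IN') / ('OUT')
def pvCountB (d : List (String × String)) (v : String) : Int :=
  (PySem.List.count (PySem.Dict.ofList d).values v : Int)

def get_preferred_extensions_alt (dictionaries : List (List (String × String))) : List (List (String × String)) :=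
  let counts_in := dictionaries.map (fun d => pvCountB d "IN")
  let counts_out := dictionaries.map (fun d => pvCountB d "OUT")
  let max_in := PySem.List.maxD counts_in (fun x => x) 0
  let max_out := PySem.List.maxD counts_out (fun x => x) 0
  let result_in := dictionaries.filter (fun d => pvCountB d "IN" == max_in)
  let result_out := dictionaries.filter (fun d => pvCountB d "OUT" == max_out)
  result_in ++ result_out

-- ===== PRECONDITION & SPEC =====
def Spec_get_preferred_extensions (dictionaries : List (List (String × String))) (out : List (List (String × String))) : Prop := out = get_preferred_extensions_alt dictionaries
instance (dictionaries : List (List (String × String))) (out : List (List (String × String))) : Decidable (Spec_get_preferred_extensions dictionaries out) := by unfold Spec_get_preferred_extensions; infer_instance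

-- ===== CLAIM (what is proved, stated in full; the proofs are below) =====
def Claim_equal_get_preferred_extensions : Prop := ∀ (dictionaries : List (List (String × String))), Dom_get_preferred_extensions dictionaries → Spec_get_preferred_extensions dictionaries (get_preferred_extensions dictionaries)

-- ===== LEMMAS AND PROOFS =====



theorem chanFold (c : List (String × String) → Int) :
    ∀ (l : List (List (String × String))) (m : Int) (res : List (List (String × String))),
    l.foldl (fun s d => if c d > s.1 then (c d, [d]) else if c d == s.1 then (s.1, s.2 ++ [d]) else s) (m, res)
    = (l.foldl (fun a d => max a (c d)) m,
       if l.foldl (fun a d => max a (c d)) m = m then res ++ l.filter (fun d => c d == m)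
       else l.filter (fun d => c d == l.foldl (fun a d => max a (c d)) m)) := by
  intro l
  induction l with
  | nil => intro m res; simp
  | cons d t ih =>
    intro m res
    have hstep : ((d :: t).foldl
        (fun s d => if c d > s.1 then (c d, [d]) else if c d == s.1 then (s.1, s.2 ++ [d]) else s) (m, res))
      = t.foldl (fun s d => if c d > s.1 then (c d, [d]) else if c d == s.1 then (s.1, s.2 ++ [d]) else s)
          (if c d > m then (c d, [d]) else if c d == m then (m, res ++ [d]) else (m, res)) := rfl
    have hF : (d :: t).foldl (fun a d => max a (c d)) m = t.foldl (fun a d => max a (c d)) (max m (c d)) := rfl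
    rw [hstep, hF]
    by_cases h1 : c d > m
    · rw [if_pos h1]
      have hm : max m (c d) = c d := by omega
      rw [hm, ih]
      have hub := (PySem.List.le_foldl_max_int t c (c d)).1
      have hne : t.foldl (fun a d => max a (c d)) (c d) ≠ m := by omega
      rw [if_neg hne]
      by_cases h2 : t.foldl (fun a d => max a (c d)) (c d) = c d
      · rw [if_pos h2, h2]
        simp
      · rw [if_neg h2]
        have hb : (c d == t.foldl (fun a d => max a (c d)) (c d)) = false := by
          simp only [beq_eq_false_iff_ne, ne_eq]; omega
        simp [hb]
    · have hm : max m (c d) = m := by omega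
      rw [if_neg h1, hm]
      by_cases h2 : c d = m
      · rw [if_pos (by simp [h2]), ih]
        by_cases h3 : t.foldl (fun a d => max a (c d)) m = m
        · rw [if_pos h3, if_pos h3]
          simp [h2]
        · rw [if_neg h3, if_neg h3]
          have hb : (c d == t.foldl (fun a d => max a (c d)) m) = false := by
            simp only [beq_eq_false_iff_ne, ne_eq]; omega
          simp [hb]
      · rw [if_neg (by simp [h2]), ih]
        have hge := (PySem.List.le_foldl_max_int t c m).1
        by_cases h3 : t.foldl (fun a d => max a (c d)) m = m
        · rw [if_pos h3, if_pos h3]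
          have hb : (c d == m) = false := by simp [h2]
          simp [hb]
        · rw [if_neg h3, if_neg h3]
          have hb : (c d == t.foldl (fun a d => max a (c d)) m) = false := by
            simp only [beq_eq_false_iff_ne, ne_eq]; omega
          simp [hb]

-- A's combined loop splits into the two independent channel loops
theorem prodFold {α β γ : Type} (f : α → γ → α) (g : β → γ → β) :
    ∀ (l : List γ) (a : α) (b : β),
    l.foldl (fun s d => (f s.1 d, g s.2 d)) (a, b) = (l.foldl f a, l.foldl g b) := by
  intro l
  induction l with
  | nil => intro a b; simp
  | cons x t ih => intro a b; simp [ih]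

theorem countA_eq_countB (d : List (String × String)) (v : String) :
    pvCountA d v = pvCountB d v := by
  unfold pvCountA pvCountB
  rw [PySem.List.foldl_beq_add_one]
  simp [PySem.List.count]

theorem countA_nonneg (d : List (String × String)) (v : String) : 0 ≤ pvCountA d v := by
  rw [countA_eq_countB]; simp [pvCountB]

theorem maxD_eq_foldl (c : List (String × String) → Int)
    (hc : ∀ d, 0 ≤ c d) (l : List (List (String × String))) :
    PySem.List.maxD (l.map c) (fun x => x) 0 = l.foldl (fun a d => max a (c d)) 0 := by
  cases l with
  | nil => simp [PySem.List.maxD, PySem.List.max?]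
  | cons d t =>
    simp only [List.map_cons, PySem.List.maxD, PySem.List.max?_id_cons, Option.getD_some]
    rw [List.foldl_cons, List.foldl_map]
    have h : max 0 (c d) = c d := by have := hc d; omega
    rw [h]

theorem chanResult (v : String) (l : List (List (String × String))) :
    (l.foldl (fun s d => if pvCountA d v > s.1 then (pvCountA d v, [d])
                         else if pvCountA d v == s.1 then (s.1, s.2 ++ [d]) else s)
      ((0 : Int), ([] : List (List (String × String))))).2
    = l.filter (fun d => pvCountB d v == PySem.List.maxD (l.map (fun d => pvCountB d v)) (fun x => x) 0) := by
  rw [chanFold (fun d => pvCountA d v) l 0 []]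
  have hmax : PySem.List.maxD (l.map (fun d => pvCountB d v)) (fun x => x) 0
      = l.foldl (fun a d => max a (pvCountA d v)) 0 := by
    have h := maxD_eq_foldl (fun d => pvCountA d v) (fun d => countA_nonneg d v) l
    simpa [countA_eq_countB] using h
  rw [hmax]
  simp only [countA_eq_countB]
  by_cases h : l.foldl (fun a d => max a (pvCountB d v)) 0 = 0
  · simp [h]
  · simp [h]



-- ===== VERDICT (by name: the statement is the Claim_ definition above) =====
theorem get_preferred_extensions_spec : Claim_equal_get_preferred_extensions := by
  intro dictionaries _
  show (dictionaries.foldl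
      (fun (s : (Int × List (List (String × String))) × (Int × List (List (String × String)))) d =>
        (if pvCountA d "IN" > s.1.1 then (pvCountA d "IN", [d])
         else if pvCountA d "IN" == s.1.1 then (s.1.1, s.1.2 ++ [d]) else s.1,
         if pvCountA d "OUT" > s.2.1 then (pvCountA d "OUT", [d])
         else if pvCountA d "OUT" == s.2.1 then (s.2.1, s.2.2 ++ [d]) else s.2))
      ((0, []), (0, []))).1.2
    ++ (dictionaries.foldl
      (fun (s : (Int × List (List (String × String))) × (Int × List (List (String × String)))) d =>
        (if pvCountA d "IN" > s.1.1 then (pvCountA d "IN", [d])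
         else if pvCountA d "IN" == s.1.1 then (s.1.1, s.1.2 ++ [d]) else s.1,
         if pvCountA d "OUT" > s.2.1 then (pvCountA d "OUT", [d])
         else if pvCountA d "OUT" == s.2.1 then (s.2.1, s.2.2 ++ [d]) else s.2))
      ((0, []), (0, []))).2.2
    = dictionaries.filter (fun d => pvCountB d "IN" == PySem.List.maxD (dictionaries.map (fun d => pvCountB d "IN")) (fun x => x) 0)
      ++ dictionaries.filter (fun d => pvCountB d "OUT" == PySem.List.maxD (dictionaries.map (fun d => pvCountB d "OUT")) (fun x => x) 0)
  rw [prodFold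
    (fun s1 d => if pvCountA d "IN" > s1.1 then (pvCountA d "IN", [d])
                 else if pvCountA d "IN" == s1.1 then (s1.1, s1.2 ++ [d]) else s1)
    (fun s2 d => if pvCountA d "OUT" > s2.1 then (pvCountA d "OUT", [d])
                 else if pvCountA d "OUT" == s2.1 then (s2.1, s2.2 ++ [d]) else s2)]
  rw [chanResult "IN", chanResult "OUT"]
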